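-- pv_equiv track=rewrite | github.com/deltaLRD/IMAG-WS | admins/views.py | author_list
-- ===== SOURCE A (Python) =====
-- def author_list(author):
--     author_list = []
--     author = author.split(' and ')
--     for row in author:
--         row = row.split(',')
--         for i in row:
--             author_list.append(i)
--     return author_list
-- ===== SOURCE B (Python) =====
-- def author_list(author):
--     return author.replace(' and ', ',').split(',')
-- ===== Notes on version B (the rewrite author's own statement) =====
-- stated objective: simpler
-- what changed: B normalizes the ' and ' delimiter into ',' with one replace pass and does a single flat split, replacing A's nested split loops with an accumulator.
import Mathlib
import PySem

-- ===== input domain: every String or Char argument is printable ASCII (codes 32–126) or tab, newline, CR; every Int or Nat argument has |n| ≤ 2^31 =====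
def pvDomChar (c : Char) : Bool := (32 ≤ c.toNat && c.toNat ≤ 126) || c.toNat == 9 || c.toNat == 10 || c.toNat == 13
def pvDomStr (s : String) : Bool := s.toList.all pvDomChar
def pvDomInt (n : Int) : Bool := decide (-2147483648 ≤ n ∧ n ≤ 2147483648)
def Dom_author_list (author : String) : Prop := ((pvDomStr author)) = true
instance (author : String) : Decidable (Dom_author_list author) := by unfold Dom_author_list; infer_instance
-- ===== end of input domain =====

-- B replaces A's nested split loops (split on ' and ', then each piece on ',') by one
-- replace pass normalizing ' and ' to ',' followed by a single flat split ('simpler').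


-- ===== PORT A =====
-- author.split(' and '), then for each row: for each i in row.split(','): append
def author_list (author : String) : List String :=
  (PySem.Chars.splitOn author.toList " and ".toList).foldl
    (fun acc row =>
      (PySem.Chars.splitOn row ",".toList).foldl
        (fun acc2 i => acc2 ++ [String.ofList i]) acc) []

-- ===== PORT B =====
-- author.replace(' and ', ',').split(',')
def author_list_alt (author : String) : List String :=
  (PySem.Chars.splitOn
    (PySem.Chars.replace author.toList " and ".toList ",".toList) ",".toList).map String.ofList

-- ===== PRECONDITION & SPEC =====
def Spec_author_list (author : String) (out : List String) : Prop := out = author_list_alt author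
instance (author : String) (out : List String) : Decidable (Spec_author_list author out) := by unfold Spec_author_list; infer_instance

-- ===== CLAIM (what is proved, stated in full; the proofs are below) =====
def Claim_equal_author_list : Prop := ∀ (author : String), Dom_author_list author → Spec_author_list author (author_list author)

-- ===== LEMMAS AND PROOFS =====

-- simple (fuel-free) recursion equivalents of PySem's fueled scans
def splitS (sep : List Char) : List Char → List (List Char)
  | [] => [[]]
  | c :: t =>
    if sep.isPrefixOf (c :: t) then [] :: splitS sep (t.drop (sep.length - 1))
    else (splitS sep t).modifyHead (c :: ·)
termination_by s => s.length
decreasing_by all_goals (simp only [List.length_drop, List.length_cons]; omega)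

def replS (old new : List Char) : List Char → List Char
  | [] => []
  | c :: t =>
    if old.isPrefixOf (c :: t) then new ++ replS old new (t.drop (old.length - 1))
    else c :: replS old new t
termination_by s => s.length
decreasing_by all_goals (simp only [List.length_drop, List.length_cons]; omega)

theorem splitS_ne_nil (sep s : List Char) : splitS sep s ≠ [] := by
  induction hn : s.length using Nat.strong_induction_on generalizing s with
  | _ n ih =>
  subst hn
  match s with
  | [] => simp [splitS]
  | c :: t =>
    rw [splitS]
    split_ifs
    · simp
    · have ht := ih t.length (by simp) t rfl
      cases h0 : splitS sep t
      · exact absurd h0 ht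
      · simp

theorem go_eq_splitS (sep : List Char) (hsep : sep ≠ []) :
    ∀ (fuel : Nat) (l cur : List Char) (acc : List (List Char)), l.length ≤ fuel →
    PySem.Chars.splitOn.go sep fuel l cur acc
      = acc.reverse ++ (splitS sep l).modifyHead (cur.reverse ++ ·) := by
  intro fuel
  induction fuel with
  | zero =>
    intro l cur acc h
    have hl : l = [] := List.eq_nil_of_length_eq_zero (Nat.le_zero.mp h)
    subst hl
    simp [PySem.Chars.splitOn.go, splitS]
  | succ n ih =>
    intro l cur acc h
    match l with
    | [] => simp [PySem.Chars.splitOn.go, splitS]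
    | c :: t =>
      rw [PySem.Chars.splitOn.go]
      by_cases hp : sep.isPrefixOf (c :: t)
      · rw [if_pos hp]
        have hdrop : (c :: t).drop sep.length = t.drop (sep.length - 1) := by
          match sep, hsep with
          | s0 :: srest, _ => simp
        have hlen : ((c :: t).drop sep.length).length ≤ n := by
          have hs1 : 0 < sep.length := List.length_pos_of_ne_nil hsep
          simp only [List.length_drop, List.length_cons]
          simp only [List.length_cons] at h
          omega
        rw [ih _ _ _ hlen]
        rw [splitS]
        rw [if_pos hp, hdrop]
        simp [List.modifyHead]
        cases splitS sep (t.drop (sep.length - 1)) <;> simp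
      · rw [if_neg hp]
        have hlen : t.length ≤ n := by simp at h; omega
        rw [ih _ _ _ hlen]
        rw [splitS, if_neg hp]
        cases hs : splitS sep t with
        | nil => exact absurd hs (splitS_ne_nil sep t)
        | cons p ps => simp [List.modifyHead]

theorem splitOn_eq_splitS (sep s : List Char) (hsep : sep ≠ []) :
    PySem.Chars.splitOn s sep = splitS sep s := by
  rw [PySem.Chars.splitOn, go_eq_splitS sep hsep _ _ _ _ (by omega)]
  cases hs : splitS sep s with
  | nil => exact absurd hs (splitS_ne_nil sep s)
  | cons p ps => simp [List.modifyHead]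

theorem replaceGo_eq_replS (old new : List Char) (hold : old ≠ []) :
    ∀ (fuel : Nat) (l acc : List Char), l.length ≤ fuel →
    PySem.Chars.replace.go old new fuel l acc = acc.reverse ++ replS old new l := by
  intro fuel
  induction fuel with
  | zero =>
    intro l acc h
    have hl : l = [] := List.eq_nil_of_length_eq_zero (Nat.le_zero.mp h)
    subst hl
    simp [PySem.Chars.replace.go, replS]
  | succ n ih =>
    intro l acc h
    match l with
    | [] => simp [PySem.Chars.replace.go, replS]
    | c :: t =>
      rw [PySem.Chars.replace.go]
      by_cases hp : old.isPrefixOf (c :: t)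
      · rw [if_pos hp]
        have hdrop : (c :: t).drop old.length = t.drop (old.length - 1) := by
          match old, hold with
          | o0 :: orest, _ => simp
        have hlen : (t.drop (old.length - 1)).length ≤ n := by
          simp only [List.length_drop]
          simp only [List.length_cons] at h
          omega
        rw [hdrop, ih _ _ hlen]
        rw [replS, if_pos hp]
        simp
      · rw [if_neg hp]
        have hlen : t.length ≤ n := by simp at h; omega
        rw [ih _ _ hlen]
        rw [replS, if_neg hp]
        simp

theorem replace_eq_replS (old new s : List Char) (hold : old ≠ []) :
    PySem.Chars.replace s old new = replS old new s := by
  rw [PySem.Chars.replace]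
  rw [if_neg (by simpa [List.isEmpty_iff] using hold)]
  rw [replaceGo_eq_replS old new hold _ _ _ (le_refl _)]
  simp

theorem splitS_nil (sep : List Char) : splitS sep [] = [[]] := by rw [splitS]

theorem splitS_comma_cons_comma (x : List Char) :
    splitS [','] (',' :: x) = [] :: splitS [','] x := by
  rw [splitS]
  simp [List.isPrefixOf]

theorem splitS_comma_cons (c : Char) (hc : c ≠ ',') (x : List Char) :
    splitS [','] (c :: x) = (splitS [','] x).modifyHead (c :: ·) := by
  rw [splitS]
  simp [List.isPrefixOf, Ne.symm hc]

-- main: splitting the normalized string on ',' = flatMap of the nested splits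
theorem main_glue (old : List Char) :
    ∀ s : List Char,
    splitS [','] (replS old [','] s) = (splitS old s).flatMap (splitS [','] ·) := by
  intro s
  induction hn : s.length using Nat.strong_induction_on generalizing s with
  | _ n ih =>
  subst hn
  match s with
  | [] => simp [replS, splitS_nil]
  | c :: t =>
    have hdlen : (t.drop (old.length - 1)).length < (c :: t).length := by
      simp only [List.length_drop, List.length_cons]; omega
    rw [replS]
    by_cases hp : old.isPrefixOf (c :: t)
    · rw [if_pos hp]
      have ihd := ih _ hdlen (t.drop (old.length - 1)) rfl
      rw [List.singleton_append, splitS_comma_cons_comma, ihd]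
      conv_rhs => rw [splitS, if_pos hp]
      simp [List.flatMap_cons, splitS_nil]
    · rw [if_neg hp]
      have iht := ih _ (by simp) t rfl
      conv_rhs => rw [splitS, if_neg hp]
      by_cases hc : c = ','
      · subst hc
        rw [splitS_comma_cons_comma, iht]
        cases hs : splitS old t with
        | nil => exact absurd hs (splitS_ne_nil old t)
        | cons p ps =>
          simp only [List.modifyHead, List.flatMap_cons]
          rw [splitS_comma_cons_comma]
          simp
      · rw [splitS_comma_cons c hc, iht]
        cases hs : splitS old t with
        | nil => exact absurd hs (splitS_ne_nil old t)
        | cons p ps =>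
          simp only [List.modifyHead, List.flatMap_cons]
          rw [splitS_comma_cons c hc]
          cases hq : splitS [','] p with
          | nil => exact absurd hq (splitS_ne_nil _ p)
          | cons q qs => simp [List.modifyHead]

-- inner/outer foldl shapes of port A
theorem inner_foldl (rows : List (List Char)) (acc : List String) :
    rows.foldl (fun acc2 i => acc2 ++ [String.ofList i]) acc = acc ++ rows.map String.ofList := by
  induction rows generalizing acc with
  | nil => simp
  | cons r rs ih => simp [List.foldl_cons, ih]

theorem outer_foldl (parts : List (List Char)) (acc : List String) :
    parts.foldl (fun acc row =>
      (PySem.Chars.splitOn row ",".toList).foldl (fun acc2 i => acc2 ++ [String.ofList i]) acc) acc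
    = acc ++ parts.flatMap (fun row => (PySem.Chars.splitOn row ",".toList).map String.ofList) := by
  induction parts generalizing acc with
  | nil => simp
  | cons p ps ih =>
    rw [List.foldl_cons, inner_foldl, ih, List.flatMap_cons, List.append_assoc]

-- ===== VERDICT (by name: the statement is the Claim_ definition above) =====
theorem author_list_spec : Claim_equal_author_list := by
  intro author _
  unfold Spec_author_list author_list author_list_alt
  rw [outer_foldl]
  have hold : " and ".toList ≠ [] := by decide
  have hcomma : ",".toList = [','] := by decide
  rw [hcomma]
  rw [replace_eq_replS _ _ _ hold]
  rw [splitOn_eq_splitS [','] _ (by decide)]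
  rw [main_glue " and ".toList]
  rw [splitOn_eq_splitS _ _ hold]
  rw [List.map_flatMap]
  simp only [List.nil_append]
  congr 1
  funext row
  rw [splitOn_eq_splitS [','] row (by decide)]
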